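-- pv_equiv track=rewrite | github.com/gfmortega/abakoda-2023-long-solutions | M1/kevin.py | solve
-- ===== SOURCE A (Python) =====
-- from itertools import chain
--
-- dijs = [(i, j) for i in (-1, 0, +1) for j in (-1, 0, +1) if abs(i) + abs(j) == 1]
--
-- def solve(grid):
--     r, [c] = len(grid), {*map(len, grid)}
--     if len(poss := {grid[i][j]: (i, j) for i, j in chain(
--             ((i, j) for i in range(r) for j in (0, c-1)),
--             ((i, j) for j in range(c) for i in (0, r-1)),
--         )}) != 2: return
--     vis = [[False]*c for i in range(r)]
--     for v, (i, j) in poss.items():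
--         vis[i][j] = True
--         stak = [(i, j)]
--         while stak:
--             i, j = stak.pop()
--             for di, dj in dijs:
--                 if 0 <= (ni := i + di) < r and 0 <= (nj := j + dj) < c and grid[ni][nj] == v and not vis[ni][nj]:
--                     vis[ni][nj] = True
--                     stak.append((ni, nj))
--     if not all(all(row) for row in vis): return
--     return 1 + sum(
--         sum(grid[i + di][j + dj] != grid[i][j] for di in (0, 1) for dj in (0, 1)) & 1
--         for i in range(r - 1)
--         for j in range(c - 1)
--     )
-- ===== SOURCE B (Python) =====
-- from itertools import chain
--
-- def solve(grid):
--     # Same rectangular check and two-border-values dict as A; the flood fill is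
--     # replaced by an iterative neighbour-propagation fixpoint over a set of cells,
--     # the coverage test by a cardinality check, and the 2x2 parity by an xor chain.
--     r, [c] = len(grid), {*map(len, grid)}
--     if len(poss := {grid[i][j]: (i, j) for i, j in chain(
--             ((i, j) for i in range(r) for j in (0, c-1)),
--             ((i, j) for j in range(c) for i in (0, r-1)),
--         )}) != 2: return None
--     marked = set(poss.values())
--     for _ in range(r * c):
--         marked |= {(ni, nj)
--                    for i, j in marked
--                    for ni, nj in ((i - 1, j), (i + 1, j), (i, j - 1), (i, j + 1))
--                    if 0 <= ni < r and 0 <= nj < c and grid[ni][nj] == grid[i][j]}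
--     if len(marked) != r * c: return None
--     return 1 + sum((grid[i][j] != grid[i][j+1])
--                    ^ (grid[i][j] != grid[i+1][j])
--                    ^ (grid[i][j] != grid[i+1][j+1])
--                    for i in range(r - 1) for j in range(c - 1))
-- ===== Notes on version B (the rewrite author's own statement) =====
-- stated objective: alternative
-- what changed: The stack-based DFS flood fill from each seed is replaced by an iterative neighbour-propagation fixpoint over a single set of cells, the all(all(row)) visited-matrix test by a cardinality check len(marked) == r*c, and the 2x2 mismatch-count-&1 parity by an xor chain of the three comparisons; the rectangularity check and the two-border-values dict are kept.
import Mathlib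
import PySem

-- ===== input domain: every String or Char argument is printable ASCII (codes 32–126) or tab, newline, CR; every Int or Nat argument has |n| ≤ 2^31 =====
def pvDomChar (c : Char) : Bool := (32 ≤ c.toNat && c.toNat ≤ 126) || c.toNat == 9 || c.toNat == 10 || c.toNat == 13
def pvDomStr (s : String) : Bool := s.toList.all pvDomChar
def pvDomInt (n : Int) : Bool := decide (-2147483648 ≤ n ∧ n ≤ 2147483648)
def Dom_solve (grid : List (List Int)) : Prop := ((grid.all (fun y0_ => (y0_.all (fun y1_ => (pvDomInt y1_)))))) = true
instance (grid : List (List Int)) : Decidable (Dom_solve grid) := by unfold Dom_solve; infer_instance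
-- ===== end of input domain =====

-- B replaces A's per-seed stack DFS by a neighbour-propagation fixpoint on one set of
-- cells, the all(all(row)) test by a cardinality check and the &1 parity by an xor chain;
-- the rectangularity check and the two-border-values dict are unchanged.

-- ===== PORT A =====

-- grid[i][j] / grid[ni][nj]: every read in either program happens with 0 <= i < r and
-- 0 <= j < c (guarded in the code or guaranteed by Pre_solve), where pyGetD is exact.
def gv (g : List (List Int)) (i j : Int) : Int :=
  PySem.List.pyGetD (PySem.List.pyGetD g i []) j 0

-- {*map(len, grid)}
def rowLens (grid : List (List Int)) : List Int :=
  PySem.Set.ofList (grid.map fun row => (row.length : Int))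

-- the chained border-coordinate generator of the poss comprehension, in order
def borderCoords (r c : Int) : List (Int × Int) :=
  ((PySem.List.pyRange 0 r 1).flatMap fun i => [(i, 0), (i, c - 1)]) ++
  ((PySem.List.pyRange 0 c 1).flatMap fun j => [(0, j), (r - 1, j)])

-- poss = {grid[i][j]: (i, j) for i, j in chain(...)}  (later duplicates overwrite the value)
def borderPoss (g : List (List Int)) (r c : Int) : PySem.Dict Int (Int × Int) :=
  (borderCoords r c).foldl (fun d p => d.insert (gv g p.1 p.2) p) PySem.Dict.empty

def dijs : List (Int × Int) := [(-1, 0), (0, -1), (0, 1), (1, 0)]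

def vget (vis : List (List Bool)) (i j : Int) : Bool :=
  PySem.List.pyGetD (PySem.List.pyGetD vis i []) j false

-- vis[i][j] = True  (indices always in range at every call site)
def vset (vis : List (List Bool)) (i j : Int) : List (List Bool) :=
  PySem.List.pySetD vis i (PySem.List.pySetD (PySem.List.pyGetD vis i []) j true)

-- the while-stak loop; fuel r*c+1 is an upper bound on the number of iterations
-- (each iteration pops one entry; every push marks a previously unmarked cell)
def dfsLoop (g : List (List Int)) (r c v : Int) :
    Nat → List (Int × Int) → List (List Bool) → List (List Bool)
  | 0, _, vis => vis
  | _ + 1, [], vis => vis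
  | f + 1, (i, j) :: rest, vis =>
      let st := dijs.foldl (fun st d =>
        let ni := i + d.1
        let nj := j + d.2
        if 0 ≤ ni ∧ ni < r ∧ 0 ≤ nj ∧ nj < c ∧ gv g ni nj = v ∧ vget st.1 ni nj = false
        then (vset st.1 ni nj, (ni, nj) :: st.2) else st) (vis, rest)
      dfsLoop g r c v f st.2 st.1

def solve (grid : List (List Int)) : Option Int :=
  let r : Int := grid.length
  match rowLens grid with
  | [c] =>
    let poss := borderPoss grid r c
    if poss.size ≠ 2 then none else
    let vis0 : List (List Bool) := List.replicate r.toNat (List.replicate c.toNat false)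
    let vis := poss.items.foldl (fun vis kv =>
      dfsLoop grid r c kv.1 (r.toNat * c.toNat + 1) [kv.2] (vset vis kv.2.1 kv.2.2)) vis0
    if ¬ (vis.all fun row => row.all id) then none else
    some (1 + ((PySem.List.pyRange 0 (r - 1) 1).map fun i =>
      ((PySem.List.pyRange 0 (c - 1) 1).map fun j =>
        PySem.Int.band
          ((([(0 : Int), 1]).map fun di =>
            (([(0 : Int), 1]).map fun dj =>
              if gv grid (i + di) (j + dj) ≠ gv grid i j then (1 : Int) else 0).sum).sum)
          1).sum).sum)
  | _ => none

-- ===== PORT B =====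

def neigh (p : Int × Int) : List (Int × Int) :=
  [(p.1 - 1, p.2), (p.1 + 1, p.2), (p.1, p.2 - 1), (p.1, p.2 + 1)]

-- marked |= {(ni,nj) for i,j in marked for ni,nj in (...) if in bounds and equal value}
def sweepStep (g : List (List Int)) (r c : Int) (M : PySem.Set (Int × Int)) :
    PySem.Set (Int × Int) :=
  PySem.Set.union M (M.foldl (fun s p =>
    (neigh p).foldl (fun s q =>
      if 0 ≤ q.1 ∧ q.1 < r ∧ 0 ≤ q.2 ∧ q.2 < c ∧ gv g q.1 q.2 = gv g p.1 p.2
      then PySem.Set.add s q else s) s) PySem.Set.empty)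

def solve_alt (grid : List (List Int)) : Option Int :=
  let r : Int := grid.length
  match rowLens grid with
  | [] => none
  | _ :: _ :: _ => none
  | [c] =>
    let poss := borderPoss grid r c
    if poss.size ≠ 2 then none else
    let M := (PySem.List.pyRange 0 (r * c) 1).foldl
      (fun M _ => sweepStep grid r c M) (PySem.Set.ofList poss.values)
    if (M.length : Int) ≠ r * c then none else
    some (1 + ((PySem.List.pyRange 0 (r - 1) 1).map fun i =>
      ((PySem.List.pyRange 0 (c - 1) 1).map fun j =>
        if (decide (gv grid i j ≠ gv grid i (j + 1))
            ^^ decide (gv grid i j ≠ gv grid (i + 1) j)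
            ^^ decide (gv grid i j ≠ gv grid (i + 1) (j + 1)))
        then (1 : Int) else 0).sum).sum)
  

-- ===== PRECONDITION & SPEC =====

-- Pre_solve excludes exactly the grids on which the Python A raises (and B raises
-- identically): the empty grid and ragged grids (ValueError at the [c] unpacking)
-- and grids whose rows are empty (IndexError at grid[i][0] in the comprehension).
def Pre_solve (grid : List (List Int)) : Prop :=
  grid ≠ [] ∧ 0 < (grid.headD []).length ∧
    ∀ row ∈ grid, row.length = (grid.headD []).length

instance (grid : List (List Int)) : Decidable (Pre_solve grid) := by
  unfold Pre_solve; infer_instance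

def pvWitness_solve : List (List Int) := [[1, 1], [2, 2]]

def Spec_solve (grid : List (List Int)) (out : Option Int) : Prop := out = solve_alt grid
instance (grid : List (List Int)) (out : Option Int) : Decidable (Spec_solve grid out) := by
  unfold Spec_solve; infer_instance

-- ===== CLAIM (what is proved, stated in full; the proofs are below) =====
def Claim_equal_solve : Prop :=
  ∀ (grid : List (List Int)), Dom_solve grid → Pre_solve grid → Spec_solve grid (solve grid)

-- ===== LEMMAS AND PROOFS =====

-- ---- abstract notions ----

def inb (r c : Int) (p : Int × Int) : Prop := 0 ≤ p.1 ∧ p.1 < r ∧ 0 ≤ p.2 ∧ p.2 < c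

-- one step of equal-valued 4-adjacency into an in-bounds cell
def estep (g : List (List Int)) (r c : Int) (p q : Int × Int) : Prop :=
  inb r c q ∧ ((q.1 - p.1).natAbs + (q.2 - p.2).natAbs = 1) ∧ gv g q.1 q.2 = gv g p.1 p.2

def reach (g : List (List Int)) (r c : Int) (p q : Int × Int) : Prop :=
  Relation.ReflTransGen (estep g r c) p q

def Rect (vis : List (List Bool)) (r c : Int) : Prop :=
  vis.length = r.toNat ∧ ∀ row ∈ vis, row.length = c.toNat

def countFalse (vis : List (List Bool)) : Nat :=
  (vis.map fun row => row.countP (fun b => !b)).sum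

theorem foldl_add_mem {α : Type} [BEq α] [LawfulBEq α] (l : List α) (s : PySem.Set α)
    (h : ∀ y ∈ l, y ∈ s) : l.foldl PySem.Set.add s = s := by
  induction l generalizing s with
  | nil => rfl
  | cons x t ih =>
      simp only [List.foldl_cons, PySem.Set.add_of_mem (h x (by simp))]
      exact ih _ (fun y hy => h y (by simp [hy]))

theorem rowLens_of_pre {grid : List (List Int)} (h : Pre_solve grid) :
    rowLens grid = [((grid.headD []).length : Int)] := by
  obtain ⟨hne, hpos, hall⟩ := h
  obtain ⟨g0, t, rfl⟩ := List.exists_cons_of_ne_nil hne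
  simp only [rowLens, List.map_cons, PySem.Set.ofList_eq_foldl, List.foldl_cons]
  have h0 : PySem.Set.add ([] : PySem.Set Int) ((g0.length : Int)) = [(g0.length : Int)] := rfl
  rw [h0, foldl_add_mem]
  · simp
  · intro y hy
    simp only [List.mem_map] at hy
    obtain ⟨row, hrow, rfl⟩ := hy
    simp [hall row (by simp [hrow])]

theorem vget_eq_getElem {vis : List (List Bool)} {r c : Int} (h : Rect vis r c)
    {i j : Int} (hij : inb r c (i, j)) :
    ∃ (h1 : i.toNat < vis.length) (h2 : j.toNat < vis[i.toNat].length),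
      vget vis i j = vis[i.toNat][j.toNat] := by
  obtain ⟨hl, hrows⟩ := h
  obtain ⟨hi0, hir, hj0, hjc⟩ := hij
  have h1 : i.toNat < vis.length := by omega
  have h2 : j.toNat < vis[i.toNat].length := by
    rw [hrows _ (by exact List.getElem_mem h1)]; omega
  refine ⟨h1, h2, ?_⟩
  rw [vget, PySem.List.pyGetD_eq_getElem _ _ hi0 (by show i < (vis.length:Int); omega),
      PySem.List.pyGetD_eq_getElem _ _ hj0 (by show j < ((vis[i.toNat]).length:Int); omega)]

theorem vset_eq_set {vis : List (List Bool)} {r c : Int} (_h : Rect vis r c)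
    {i j : Int} (hij : inb r c (i, j)) (h1 : i.toNat < vis.length) :
    vset vis i j = vis.set i.toNat (vis[i.toNat].set j.toNat true) := by
  obtain ⟨hi0, hir, hj0, hjc⟩ := hij
  rw [vset, PySem.List.pySetD_of_nonneg _ _ hi0, PySem.List.pySetD_of_nonneg _ _ hj0,
      PySem.List.pyGetD_eq_getElem _ _ hi0 (by show i < (vis.length:Int); omega)]

theorem rect_vset {vis : List (List Bool)} {r c : Int} (h : Rect vis r c)
    {i j : Int} (hij : inb r c (i, j)) : Rect (vset vis i j) r c := by
  have h1 : i.toNat < vis.length := by obtain ⟨hl, _⟩ := h; obtain ⟨_,_,_,_⟩ := hij; omega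
  rw [vset_eq_set h hij h1]
  obtain ⟨hl, hrows⟩ := h
  refine ⟨by simpa using hl, ?_⟩
  intro row hrow
  rcases List.mem_or_eq_of_mem_set hrow with hm | rfl
  · exact hrows _ hm
  · simpa using hrows _ (List.getElem_mem h1)

theorem vget_vset {vis : List (List Bool)} {r c : Int} (h : Rect vis r c)
    {i j : Int} (hij : inb r c (i, j))
    (a b : Int) (hab : inb r c (a, b)) :
    vget (vset vis i j) a b = if a = i ∧ b = j then true else vget vis a b := by
  have h1 : i.toNat < vis.length := by obtain ⟨hl, _⟩ := h; obtain ⟨_,_,_,_⟩ := hij; omega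
  have hw : vset vis i j = vis.set i.toNat (vis[i.toNat].set j.toNat true) :=
    vset_eq_set h hij h1
  obtain ⟨g1, g2, hg⟩ := vget_eq_getElem (vis := vset vis i j) (rect_vset h hij) hab
  obtain ⟨f1, f2, hf⟩ := vget_eq_getElem h hab
  rw [hg, hf]
  simp only [hw, List.getElem_set]
  obtain ⟨hi0, hir, hj0, hjc⟩ := hij
  obtain ⟨ha0, har, hb0, hbc⟩ := hab
  by_cases hai : a = i
  · subst hai
    by_cases hbj : b = j
    · subst hbj; simp
    · have : j.toNat ≠ b.toNat := by omega
      simp [this, hbj]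
  · have : i.toNat ≠ a.toNat := by omega
    simp [this, hai]

theorem rect_vis0 (r c : Int) :
    Rect (List.replicate r.toNat (List.replicate c.toNat false)) r c := by
  constructor
  · simp
  · intro row hrow
    simp only [List.mem_replicate] at hrow
    simp [hrow.2]

theorem vget_vis0 (r c : Int) (i j : Int) :
    vget (List.replicate r.toNat (List.replicate c.toNat false)) i j = false := by
  unfold vget
  by_cases h1 : PySem.Raise.InRange (List.replicate r.toNat (List.replicate c.toNat false)).length i
  · rw [List.eq_of_mem_replicate (PySem.List.pyGetD_mem _ ([] : List Bool) h1)]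
    by_cases h2 : PySem.Raise.InRange (List.replicate c.toNat false).length j
    · exact List.eq_of_mem_replicate (PySem.List.pyGetD_mem _ false h2)
    · exact PySem.List.pyGetD_of_none _ _ _ (by rw [PySem.List.pyGet?_eq_none_iff]; exact h2)
  · rw [PySem.List.pyGetD_of_none (List.replicate r.toNat (List.replicate c.toNat false)) i
      ([] : List Bool) (by rw [PySem.List.pyGet?_eq_none_iff]; exact h1)]
    cases hj : PySem.List.pyGet? ([] : List Bool) j with
    | none => exact PySem.List.pyGetD_of_none _ _ _ hj
    | some x => exact absurd (PySem.List.mem_of_pyGet?_eq_some _ hj) (List.not_mem_nil)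

theorem countP_set_false {row : List Bool} {b : Nat} (hb : b < row.length)
    (hf : row[b] = false) :
    (row.set b true).countP (fun x => !x) + 1 = row.countP (fun x => !x) := by
  induction row generalizing b with
  | nil => simp at hb
  | cons x t ih =>
      cases b with
      | zero => simp_all
      | succ n =>
          simp only [List.set_cons_succ, List.countP_cons]
          have := ih (b := n) (by simpa using hb) (by simpa using hf)
          omega

theorem countFalse_set (vis : List (List Bool)) (a b : Nat) (h1 : a < vis.length)
    (h2 : b < vis[a].length) (hf : vis[a][b] = false) :
    countFalse (vis.set a (vis[a].set b true)) + 1 = countFalse vis := by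
  induction vis generalizing a with
  | nil => simp at h1
  | cons row t ih =>
      cases a with
      | zero =>
          simp only [List.getElem_cons_zero] at h2 hf
          simp only [List.getElem_cons_zero, List.set_cons_zero, countFalse,
            List.map_cons, List.sum_cons]
          have := countP_set_false h2 hf
          omega
      | succ n =>
          simp only [List.getElem_cons_succ] at h2 hf
          simp only [List.getElem_cons_succ, List.set_cons_succ, countFalse,
            List.map_cons, List.sum_cons]
          have := ih n (by simpa using h1) h2 hf
          simp only [countFalse] at this
          omega

theorem countFalse_vset {vis : List (List Bool)} {r c : Int} (h : Rect vis r c)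
    {i j : Int} (hij : inb r c (i, j))
    (hf : vget vis i j = false) : countFalse (vset vis i j) + 1 = countFalse vis := by
  have h1 : i.toNat < vis.length := by obtain ⟨hl, _⟩ := h; obtain ⟨_,_,_,_⟩ := hij; omega
  obtain ⟨f1, f2, hfe⟩ := vget_eq_getElem h hij
  rw [hfe] at hf
  rw [vset_eq_set h hij h1]
  exact countFalse_set vis i.toNat j.toNat f1 f2 hf

theorem countFalse_le_aux (vis : List (List Bool)) (m : Nat)
    (h : ∀ row ∈ vis, row.length = m) : countFalse vis ≤ vis.length * m := by
  induction vis with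
  | nil => simp [countFalse]
  | cons row t ih =>
      simp only [countFalse, List.map_cons, List.sum_cons, List.length_cons]
      have hr : row.countP (fun b => !b) ≤ m := by
        rw [← h row (by simp)]; exact List.countP_le_length
      have ht := ih (fun x hx => h x (by simp [hx]))
      simp only [countFalse] at ht
      have : (t.length + 1) * m = t.length * m + m := by ring
      omega

theorem countFalse_le {vis : List (List Bool)} {r c : Int} (h : Rect vis r c) :
    countFalse vis ≤ r.toNat * c.toNat := by
  obtain ⟨hl, hrows⟩ := h
  have := countFalse_le_aux vis c.toNat hrows
  rw [hl] at this
  exact this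

theorem all_iff_vget {vis : List (List Bool)} {r c : Int} (h : Rect vis r c) :
    (vis.all fun row => row.all id) = true ↔ ∀ p, inb r c p → vget vis p.1 p.2 = true := by
  constructor
  · intro hall p hp
    obtain ⟨h1, h2, he⟩ := vget_eq_getElem h (by exact hp)
    rw [he]
    simp only [List.all_eq_true] at hall
    exact hall _ (List.getElem_mem h1) _ (List.getElem_mem h2)
  · intro hv
    simp only [List.all_eq_true]
    intro row hrow x hx
    obtain ⟨a, ha, rfl⟩ := List.mem_iff_getElem.mp hrow
    obtain ⟨b, hb, rfl⟩ := List.mem_iff_getElem.mp hx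
    have hl := h.1
    have hrl := h.2 _ (List.getElem_mem ha)
    have hinb : inb r c ((a : Int), (b : Int)) := by
      refine ⟨?_, ?_, ?_, ?_⟩ <;> simp <;> omega
    obtain ⟨h1, h2, he⟩ := vget_eq_getElem h hinb
    have hvv := hv _ hinb
    rw [he] at hvv
    simpa using hvv

theorem estep_iff_neigh {g r c} (p q : Int × Int) :
    estep g r c p q ↔
      inb r c q ∧ q ∈ neigh p ∧ gv g q.1 q.2 = gv g p.1 p.2 := by
  simp only [estep, neigh, List.mem_cons, List.not_mem_nil, or_false]
  constructor
  · rintro ⟨hq, hd, hv⟩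
    refine ⟨hq, ?_, hv⟩
    obtain ⟨a, b⟩ := q; obtain ⟨x, y⟩ := p
    simp only [Prod.mk.injEq] at *
    omega
  · rintro ⟨hq, hd, hv⟩
    refine ⟨hq, ?_, hv⟩
    obtain ⟨a, b⟩ := q; obtain ⟨x, y⟩ := p
    simp only [Prod.mk.injEq] at hd
    rcases hd with ⟨h1, h2⟩ | ⟨h1, h2⟩ | ⟨h1, h2⟩ | ⟨h1, h2⟩ <;> omega

-- poss facts

theorem borderPoss_items_mem {g : List (List Int)} {r c : Int} {kv : Int × (Int × Int)}
    (h : kv ∈ (borderPoss g r c).items) :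
    kv.2 ∈ borderCoords r c ∧ kv.1 = gv g kv.2.1 kv.2.2 := by
  unfold borderPoss at h
  suffices H : ∀ (l : List (Int × Int)) (d : PySem.Dict Int (Int × Int)),
      (∀ p ∈ l, p ∈ borderCoords r c) →
      (∀ kv ∈ d.items, kv.2 ∈ borderCoords r c ∧ kv.1 = gv g kv.2.1 kv.2.2) →
      ∀ kv ∈ (l.foldl (fun d p => d.insert (gv g p.1 p.2) p) d).items,
        kv.2 ∈ borderCoords r c ∧ kv.1 = gv g kv.2.1 kv.2.2 by
    exact H (borderCoords r c) PySem.Dict.empty (fun p hp => hp) (by simp [PySem.Dict.empty]) kv h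
  intro l
  induction l with
  | nil => intro d _ hd kv hkv; exact hd kv hkv
  | cons x t ih =>
      intro d hl hd kv hkv
      refine ih _ (fun p hp => hl p (by simp [hp])) ?_ kv hkv
      intro kv hkv
      rw [PySem.Dict.mem_items_insert] at hkv
      rcases hkv with rfl | ⟨hm, _⟩
      · exact ⟨hl x (by simp), rfl⟩
      · exact hd kv hm

theorem borderCoords_inb {r c : Int} (hr : 1 ≤ r) (hc : 1 ≤ c) {p : Int × Int}
    (h : p ∈ borderCoords r c) : inb r c p := by
  unfold borderCoords at h
  rw [List.mem_append] at h
  rcases h with h | h <;>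
  · rw [List.mem_flatMap] at h
    obtain ⟨x, hx, hp⟩ := h
    rw [PySem.List.mem_pyRange_one] at hx
    simp only [List.mem_cons, List.not_mem_nil, or_false] at hp
    rcases hp with rfl | rfl <;> refine ⟨?_, ?_, ?_, ?_⟩ <;> simp <;> omega

theorem borderPoss_keys_nodup (g : List (List Int)) (r c : Int) :
    (borderPoss g r c).keys.Nodup :=
  PySem.Dict.nodup_keys_foldl_insert_key (borderCoords r c) (fun p => gv g p.1 p.2)
    (fun _ p => p) PySem.Dict.empty (by simp [PySem.Dict.empty])

-- sweep membership

theorem mem_foldl_add_if {β : Type} [BEq β] [LawfulBEq β] (C : β → Prop) [DecidablePred C]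
    (ns : List β) (s : PySem.Set β) (q : β) :
    q ∈ ns.foldl (fun s x => if C x then PySem.Set.add s x else s) s ↔
      q ∈ s ∨ (q ∈ ns ∧ C q) := by
  induction ns generalizing s with
  | nil => simp
  | cons x t ih =>
      simp only [List.foldl_cons, List.mem_cons]
      by_cases hx : C x
      · rw [if_pos hx, ih, PySem.Set.mem_add]
        constructor
        · rintro (⟨h | rfl⟩ | ⟨h1, h2⟩)
          · exact Or.inl h
          · exact Or.inr ⟨Or.inl rfl, hx⟩
          · exact Or.inr ⟨Or.inr h1, h2⟩
        · rintro (h | ⟨rfl | h1, h2⟩)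
          · exact Or.inl (Or.inl h)
          · exact Or.inl (Or.inr rfl)
          · exact Or.inr ⟨h1, h2⟩
      · rw [if_neg hx, ih]
        constructor
        · rintro (h | ⟨h1, h2⟩)
          · exact Or.inl h
          · exact Or.inr ⟨Or.inr h1, h2⟩
        · rintro (h | ⟨rfl | h1, h2⟩)
          · exact Or.inl h
          · exact absurd h2 hx
          · exact Or.inr ⟨h1, h2⟩

theorem sweepStep_mem (g : List (List Int)) (r c : Int) (M : PySem.Set (Int × Int))
    (q : Int × Int) :
    q ∈ sweepStep g r c M ↔ q ∈ M ∨ ∃ p ∈ M, estep g r c p q := by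
  unfold sweepStep
  rw [PySem.Set.mem_union]
  have inner : ∀ (l : List (Int × Int)) (s : PySem.Set (Int × Int)),
      q ∈ l.foldl (fun s p =>
        (neigh p).foldl (fun s q =>
          if 0 ≤ q.1 ∧ q.1 < r ∧ 0 ≤ q.2 ∧ q.2 < c ∧ gv g q.1 q.2 = gv g p.1 p.2
          then PySem.Set.add s q else s) s) s ↔
        q ∈ s ∨ ∃ p ∈ l, estep g r c p q := by
    intro l
    induction l with
    | nil => simp
    | cons x t ih =>
        intro s
        simp only [List.foldl_cons, ih, mem_foldl_add_if, List.mem_cons]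
        constructor
        · rintro ((h | ⟨h1, h2⟩) | ⟨p, hp, he⟩)
          · exact Or.inl h
          · exact Or.inr ⟨x, Or.inl rfl, (estep_iff_neigh x q).mpr
              ⟨⟨h2.1, h2.2.1, h2.2.2.1, h2.2.2.2.1⟩, h1, h2.2.2.2.2⟩⟩
          · exact Or.inr ⟨p, Or.inr hp, he⟩
        · rintro (h | ⟨p, rfl | hp, he⟩)
          · exact Or.inl (Or.inl h)
          · obtain ⟨hq, hn, hv⟩ := (estep_iff_neigh p q).mp he
            exact Or.inl (Or.inr ⟨hn, hq.1, hq.2.1, hq.2.2.1, hq.2.2.2, hv⟩)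
          · exact Or.inr ⟨p, hp, he⟩
  rw [inner]
  simp [PySem.Set.empty]

theorem length_le_cells {r c : Int} (M : List (Int × Int)) (hnd : M.Nodup)
    (hin : ∀ q ∈ M, inb r c q) : M.length ≤ r.toNat * c.toNat := by
  classical
  have hsub : M.toFinset ⊆ (Finset.range r.toNat ×ˢ Finset.range c.toNat).image
      (fun ab => ((ab.1 : Int), (ab.2 : Int))) := by
    intro q hq
    rw [List.mem_toFinset] at hq
    obtain ⟨h1, h2, h3, h4⟩ := hin q hq
    rw [Finset.mem_image]
    exact ⟨(q.1.toNat, q.2.toNat), by rw [Finset.mem_product]; constructor <;> simp <;> omega,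
      by simp [Prod.ext_iff]; omega⟩
  have hcard := Finset.card_le_card hsub
  have himg : ((Finset.range r.toNat ×ˢ Finset.range c.toNat).image
      (fun ab => ((ab.1 : Int), (ab.2 : Int)))).card = r.toNat * c.toNat := by
    rw [Finset.card_image_of_injective]
    · simp
    · intro a b hab
      simp only [Prod.ext_iff] at hab ⊢
      omega
  rw [himg] at hcard
  rw [← List.toFinset_card_of_nodup hnd]
  exact hcard

-- every in-bounds cell is in a list that is nodup of full length

theorem mem_of_full {r c : Int} (M : List (Int × Int)) (hnd : M.Nodup)
    (hin : ∀ q ∈ M, inb r c q) (hlen : M.length = r.toNat * c.toNat)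
    {q : Int × Int} (hq : inb r c q) : q ∈ M := by
  classical
  set cells := (Finset.range r.toNat ×ˢ Finset.range c.toNat).image
      (fun ab => ((ab.1 : Int), (ab.2 : Int))) with hcells
  have hsub : M.toFinset ⊆ cells := by
    intro x hx
    rw [List.mem_toFinset] at hx
    obtain ⟨h1, h2, h3, h4⟩ := hin x hx
    rw [hcells, Finset.mem_image]
    exact ⟨(x.1.toNat, x.2.toNat), by rw [Finset.mem_product]; constructor <;> simp <;> omega,
      by simp [Prod.ext_iff]; omega⟩
  have himg : cells.card = r.toNat * c.toNat := by
    rw [hcells, Finset.card_image_of_injective]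
    · simp
    · intro a b hab
      simp only [Prod.ext_iff] at hab ⊢
      omega
  have heq : M.toFinset = cells := by
    apply Finset.eq_of_subset_of_card_le hsub
    rw [himg, ← hlen, List.toFinset_card_of_nodup hnd]
  have : q ∈ cells := by
    rw [hcells, Finset.mem_image]
    obtain ⟨h1, h2, h3, h4⟩ := hq
    exact ⟨(q.1.toNat, q.2.toNat), by rw [Finset.mem_product]; constructor <;> simp <;> omega,
      by simp [Prod.ext_iff]; omega⟩
  rw [← heq, List.mem_toFinset] at this
  exact this

theorem foldl_const_iterate {α β : Type} (S : α → α) (l : List β) (M : α) :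
    l.foldl (fun M _ => S M) M = S^[l.length] M := by
  induction l generalizing M with
  | nil => rfl
  | cons x t ih => simp [List.foldl_cons, ih, Function.iterate_succ_apply]

theorem sweep_prefix (g : List (List Int)) (r c : Int) (M : PySem.Set (Int × Int)) :
    ∃ d, sweepStep g r c M = M ++ d := by
  unfold sweepStep
  rw [show PySem.Set.union M _ = PySem.Set.update M _ from rfl,
    PySem.Set.update_eq_append_filter]
  exact ⟨_, rfl⟩

theorem sweep_final_char (g : List (List Int)) (r c : Int) (s1 s2 : Int × Int)
    (h1 : inb r c s1) (h2 : inb r c s2) (hne : s1 ≠ s2) :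
    ∀ q, q ∈ (PySem.List.pyRange 0 (r * c) 1).foldl
        (fun M _ => sweepStep g r c M) (PySem.Set.ofList [s1, s2]) ↔
      reach g r c s1 q ∨ reach g r c s2 q := by
  set S := sweepStep g r c with hS
  set M0 : PySem.Set (Int × Int) := PySem.Set.ofList [s1, s2] with hM0
  have hM0eq : M0 = [s1, s2] := by
    rw [hM0, PySem.Set.ofList_eq_self_of_nodup]
    simp [hne]
  -- the fold is an iterate
  rw [foldl_const_iterate]
  set N := (PySem.List.pyRange 0 (r * c) 1).length with hN
  have hNval : N = r.toNat * c.toNat := by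
    obtain ⟨rn, hrn⟩ : ∃ n : Nat, r = (n : Int) := ⟨r.toNat, by obtain ⟨_,_,_,_⟩ := h1; omega⟩
    obtain ⟨cn, hcn⟩ : ∃ n : Nat, c = (n : Int) := ⟨c.toNat, by obtain ⟨_,_,_,_⟩ := h1; omega⟩
    subst hrn hcn
    rw [hN, PySem.List.length_pyRange_one]
    simp only [Int.sub_zero, ← Nat.cast_mul, Int.toNat_natCast]
  -- invariants of each iterate
  have hstep_sound : ∀ M : PySem.Set (Int × Int),
      (∀ q ∈ M, inb r c q ∧ (reach g r c s1 q ∨ reach g r c s2 q)) →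
      (∀ q ∈ S M, inb r c q ∧ (reach g r c s1 q ∨ reach g r c s2 q)) := by
    intro M hM q hq
    rw [hS, sweepStep_mem] at hq
    rcases hq with hq | ⟨p, hp, he⟩
    · exact hM q hq
    · refine ⟨he.1, ?_⟩
      rcases (hM p hp).2 with hr | hr
      · exact Or.inl (Relation.ReflTransGen.tail hr he)
      · exact Or.inr (Relation.ReflTransGen.tail hr he)
  have hsound : ∀ k, ∀ q ∈ S^[k] M0, inb r c q ∧ (reach g r c s1 q ∨ reach g r c s2 q) := by
    intro k
    induction k with
    | zero =>
        intro q hq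
        rw [hM0eq] at hq
        rcases List.mem_cons.mp hq with rfl | hq2
        · exact ⟨h1, Or.inl Relation.ReflTransGen.refl⟩
        · rcases List.mem_cons.mp hq2 with rfl | hq3
          · exact ⟨h2, Or.inr Relation.ReflTransGen.refl⟩
          · exact absurd hq3 List.not_mem_nil
    | succ n ih =>
        rw [Function.iterate_succ_apply']
        exact hstep_sound _ ih
  have hnodup : ∀ k, (S^[k] M0).Nodup := by
    intro k
    induction k with
    | zero => exact PySem.Set.nodup_ofList _
    | succ n ih =>
        rw [Function.iterate_succ_apply']
        exact PySem.Set.nodup_union _ _ ih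
  -- monotone growth until fixpoint
  have hgrow : ∀ k, S (S^[k] M0) = S^[k] M0 ∨ (S^[k] M0).length ≥ k + 2 := by
    intro k
    induction k with
    | zero =>
        right
        simp [hM0eq]
    | succ n ih =>
        rcases ih with hfix | hlen
        · left
          rw [Function.iterate_succ_apply', hfix, hfix]
        · obtain ⟨d, hd⟩ := sweep_prefix g r c (S^[n] M0)
          rcases List.eq_nil_or_concat' d with rfl | ⟨d', x, rfl⟩
          · left
            have hfix : S (S^[n] M0) = S^[n] M0 := by rw [hS]; simpa using hd
            rw [Function.iterate_succ_apply', hfix, hfix]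
          · right
            have hlen2 : (S (S^[n] M0)).length = (S^[n] M0).length + (d' ++ [x]).length := by
              rw [hS, hd, List.length_append]
            rw [Function.iterate_succ_apply']
            simp only [List.length_append, List.length_cons, List.length_nil] at hlen2
            omega
  -- a fixpoint persists
  have hpersist : ∀ k m, k ≤ m → S (S^[k] M0) = S^[k] M0 → S^[m] M0 = S^[k] M0 := by
    intro k m hkm hfix
    induction m with
    | zero => cases Nat.le_zero.mp hkm; rfl
    | succ n ih =>
        rcases Nat.lt_or_ge k (n + 1) with hlt | hge
        · rw [Function.iterate_succ_apply', ih (by omega), hfix]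
        · have : k = n + 1 := by omega
          subst this
          rfl
  -- the final iterate is a fixpoint
  have hNfix : S (S^[N] M0) = S^[N] M0 := by
    have hge2 : 2 ≤ r.toNat * c.toNat := by
      obtain ⟨a1, a2, a3, a4⟩ := h1
      obtain ⟨b1, b2, b3, b4⟩ := h2
      rcases Nat.lt_or_ge (r.toNat * c.toNat) 2 with hlt | hge
      · exfalso
        have hrn : 1 ≤ r.toNat := by omega
        have hcn : 1 ≤ c.toNat := by omega
        have hone : r.toNat * c.toNat = 1 := by
          have := Nat.mul_le_mul hrn hcn
          omega
        have e1 : r.toNat = 1 := Nat.eq_one_of_mul_eq_one_right hone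
        have e2 : c.toNat = 1 := Nat.eq_one_of_mul_eq_one_left hone
        apply hne
        have : s1.1 = 0 ∧ s1.2 = 0 ∧ s2.1 = 0 ∧ s2.2 = 0 := by omega
        exact Prod.ext (by omega) (by omega)
      · exact hge
    rcases hgrow (N - 1) with hfix | hlen
    · have : S^[N] M0 = S^[N-1] M0 := hpersist (N - 1) N (by omega) hfix
      rw [this]
      exact hfix
    · exfalso
      have hle := length_le_cells (S^[N-1] M0) (hnodup _) (fun q hq => (hsound _ q hq).1)
      omega
  -- closure of the fixpoint
  have hclosed : ∀ p ∈ S^[N] M0, ∀ q, estep g r c p q → q ∈ S^[N] M0 := by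
    intro p hp q he
    have : q ∈ S (S^[N] M0) := by
      rw [hS, sweepStep_mem]
      exact Or.inr ⟨p, hp, he⟩
    rwa [hNfix] at this
  have hseed : s1 ∈ S^[N] M0 ∧ s2 ∈ S^[N] M0 := by
    have hsub : ∀ k, ∀ q ∈ M0, q ∈ S^[k] M0 := by
      intro k
      induction k with
      | zero => exact fun q hq => hq
      | succ n ih =>
          intro q hq
          rw [Function.iterate_succ_apply']
          obtain ⟨d, hd⟩ := sweep_prefix g r c (S^[n] M0)
          rw [hS, hd]
          exact List.mem_append_left _ (ih q hq)
    constructor <;> [exact hsub N s1 (by rw [hM0eq]; simp); exact hsub N s2 (by rw [hM0eq]; simp)]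
  have habsorb : ∀ s q, s ∈ S^[N] M0 → reach g r c s q → q ∈ S^[N] M0 := by
    intro s q hs hr
    induction hr with
    | refl => exact hs
    | tail _ he ih => exact hclosed _ ih _ he
  intro q
  constructor
  · intro hq
    exact (hsound N q hq).2
  · rintro (hq | hq)
    · exact habsorb s1 q hseed.1 hq
    · exact habsorb s2 q hseed.2 hq


theorem reach_val {g r c p q} (h : reach g r c p q) : gv g q.1 q.2 = gv g p.1 p.2 := by
  induction h with
  | refl => rfl
  | tail _ h ih => exact h.2.2.trans ih

theorem estep_iff_dijs {g r c} (v : Int) (p q : Int × Int) (hv : gv g p.1 p.2 = v) :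
    estep g r c p q ↔
      inb r c q ∧ (∃ d ∈ dijs, q = (p.1 + d.1, p.2 + d.2)) ∧ gv g q.1 q.2 = v := by
  subst hv
  simp only [estep, dijs, List.mem_cons, List.not_mem_nil, or_false]
  constructor
  · rintro ⟨hq, hd, hvv⟩
    refine ⟨hq, ?_, hvv⟩
    obtain ⟨a, b⟩ := q
    obtain ⟨x, y⟩ := p
    simp only at hd ⊢
    have : (a - x = -1 ∧ b = y) ∨ (a - x = 1 ∧ b = y) ∨ (a = x ∧ b - y = -1) ∨
        (a = x ∧ b - y = 1) := by omega
    rcases this with ⟨h1, h2⟩ | ⟨h1, h2⟩ | ⟨h1, h2⟩ | ⟨h1, h2⟩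
    · exact ⟨(-1, 0), by simp, by simp only [Prod.mk.injEq]; omega⟩
    · exact ⟨(1, 0), by simp, by simp only [Prod.mk.injEq]; omega⟩
    · exact ⟨(0, -1), by simp, by simp only [Prod.mk.injEq]; omega⟩
    · exact ⟨(0, 1), by simp, by simp only [Prod.mk.injEq]; omega⟩
  · rintro ⟨hq, ⟨d, hd, rfl⟩, hvv⟩
    refine ⟨hq, ?_, hvv⟩
    rcases hd with rfl | rfl | rfl | rfl <;> simp

-- cells newly marked and pushed while expanding p over direction list ds
def New (g : List (List Int)) (r c v : Int) (p : Int × Int) (ds : List (Int × Int))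
    (vis : List (List Bool)) (q : Int × Int) : Prop :=
  ∃ d ∈ ds, q = (p.1 + d.1, p.2 + d.2) ∧ inb r c q ∧ gv g q.1 q.2 = v ∧
    vget vis q.1 q.2 = false

theorem dfs_inner (g : List (List Int)) (r c v : Int) (i j : Int) :
    ∀ (ds : List (Int × Int)) (vis : List (List Bool)) (stk : List (Int × Int)),
    Rect vis r c →
    Rect (ds.foldl (fun st d =>
        if 0 ≤ i + d.1 ∧ i + d.1 < r ∧ 0 ≤ j + d.2 ∧ j + d.2 < c ∧
            gv g (i + d.1) (j + d.2) = v ∧ vget st.1 (i + d.1) (j + d.2) = false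
        then (vset st.1 (i + d.1) (j + d.2), (i + d.1, j + d.2) :: st.2) else st) (vis, stk)).1 r c ∧
    ((ds.foldl (fun st d =>
        if 0 ≤ i + d.1 ∧ i + d.1 < r ∧ 0 ≤ j + d.2 ∧ j + d.2 < c ∧
            gv g (i + d.1) (j + d.2) = v ∧ vget st.1 (i + d.1) (j + d.2) = false
        then (vset st.1 (i + d.1) (j + d.2), (i + d.1, j + d.2) :: st.2) else st) (vis, stk)).2.length +
      countFalse (ds.foldl (fun st d =>
        if 0 ≤ i + d.1 ∧ i + d.1 < r ∧ 0 ≤ j + d.2 ∧ j + d.2 < c ∧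
            gv g (i + d.1) (j + d.2) = v ∧ vget st.1 (i + d.1) (j + d.2) = false
        then (vset st.1 (i + d.1) (j + d.2), (i + d.1, j + d.2) :: st.2) else st) (vis, stk)).1 =
      stk.length + countFalse vis) ∧
    (∀ q, inb r c q →
      (vget (ds.foldl (fun st d =>
        if 0 ≤ i + d.1 ∧ i + d.1 < r ∧ 0 ≤ j + d.2 ∧ j + d.2 < c ∧
            gv g (i + d.1) (j + d.2) = v ∧ vget st.1 (i + d.1) (j + d.2) = false
        then (vset st.1 (i + d.1) (j + d.2), (i + d.1, j + d.2) :: st.2) else st) (vis, stk)).1 q.1 q.2 = true ↔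
        vget vis q.1 q.2 = true ∨ New g r c v (i, j) ds vis q)) ∧
    (∀ q, q ∈ (ds.foldl (fun st d =>
        if 0 ≤ i + d.1 ∧ i + d.1 < r ∧ 0 ≤ j + d.2 ∧ j + d.2 < c ∧
            gv g (i + d.1) (j + d.2) = v ∧ vget st.1 (i + d.1) (j + d.2) = false
        then (vset st.1 (i + d.1) (j + d.2), (i + d.1, j + d.2) :: st.2) else st) (vis, stk)).2 ↔
        q ∈ stk ∨ New g r c v (i, j) ds vis q) := by
  intro ds
  induction ds with
  | nil =>
      intro vis stk hrect
      refine ⟨hrect, rfl, ?_, ?_⟩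
      · intro q _
        simp [New]
      · intro q
        simp [New]
  | cons d t ih =>
      intro vis stk hrect
      simp only [List.foldl_cons]
      by_cases hg : 0 ≤ i + d.1 ∧ i + d.1 < r ∧ 0 ≤ j + d.2 ∧ j + d.2 < c ∧
          gv g (i + d.1) (j + d.2) = v ∧ vget vis (i + d.1) (j + d.2) = false
      · rw [if_pos hg]
        obtain ⟨g1, g2, g3, g4, g5, g6⟩ := hg
        have hqin : inb r c (i + d.1, j + d.2) := ⟨g1, g2, g3, g4⟩
        have hrect2 := rect_vset hrect hqin
        obtain ⟨R1, R2, R3, R4⟩ := ih (vset vis (i + d.1) (j + d.2)) ((i + d.1, j + d.2) :: stk) hrect2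
        have hcnt := countFalse_vset hrect hqin g6
        have htrans : ∀ q, inb r c q →
            (vget (vset vis (i + d.1) (j + d.2)) q.1 q.2 = true ↔
              vget vis q.1 q.2 = true ∨ q = (i + d.1, j + d.2)) := by
          intro q hq
          rw [show vget (vset vis (i + d.1) (j + d.2)) q.1 q.2 =
              (if q.1 = i + d.1 ∧ q.2 = j + d.2 then true else vget vis q.1 q.2) from
            vget_vset hrect hqin q.1 q.2 (by obtain ⟨a,b⟩ := q; exact hq)]
          constructor
          · intro h
            split at h
            · right
              obtain ⟨a, b⟩ := q
              simp only [Prod.mk.injEq]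
              exact ⟨(by simpa using ‹_ ∧ _›.1), by simpa using ‹_ ∧ _›.2⟩
            · exact Or.inl h
          · rintro (h | rfl)
            · split
              · rfl
              · exact h
            · simp
        have hNew : ∀ q, New g r c v (i, j) (d :: t) vis q ↔
            (q = (i + d.1, j + d.2) ∨ New g r c v (i, j) t (vset vis (i + d.1) (j + d.2)) q) := by
          intro q
          unfold New
          constructor
          · rintro ⟨d0, hd0, rfl, hin, hv, hfalse⟩
            rcases List.mem_cons.mp hd0 with rfl | hd0t
            · exact Or.inl rfl
            · by_cases hqd : ((i, j).1 + d0.1, (i, j).2 + d0.2) = (i + d.1, j + d.2)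
              · exact Or.inl hqd
              · refine Or.inr ⟨d0, hd0t, rfl, hin, hv, ?_⟩
                rw [show vget (vset vis (i + d.1) (j + d.2))
                    ((i, j).1 + d0.1, (i, j).2 + d0.2).1 ((i, j).1 + d0.1, (i, j).2 + d0.2).2 =
                    (if ((i, j).1 + d0.1, (i, j).2 + d0.2).1 = i + d.1 ∧
                        ((i, j).1 + d0.1, (i, j).2 + d0.2).2 = j + d.2 then true
                      else vget vis ((i, j).1 + d0.1, (i, j).2 + d0.2).1
                        ((i, j).1 + d0.1, (i, j).2 + d0.2).2) from
                  vget_vset hrect hqin _ _ hin]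
                rw [if_neg]
                · exact hfalse
                · intro hcon
                  exact hqd (by obtain ⟨e1, e2⟩ := hcon; exact Prod.ext e1 e2)
          · rintro (rfl | ⟨d0, hd0, rfl, hin, hv, hfalse⟩)
            · exact ⟨d, by simp, rfl, hqin, g5, g6⟩
            · refine ⟨d0, by simp [hd0], rfl, hin, hv, ?_⟩
              have := vget_vset hrect hqin ((i, j).1 + d0.1) ((i, j).2 + d0.2) hin
              rw [this] at hfalse
              split at hfalse
              · exact absurd hfalse (by simp)
              · exact hfalse
        refine ⟨R1, by rw [R2, List.length_cons]; omega, ?_, ?_⟩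
        · intro q hq
          rw [R3 q hq, htrans q hq, hNew q]
          tauto
        · intro q
          rw [R4 q, List.mem_cons, hNew q]
          tauto
      · rw [if_neg hg]
        obtain ⟨R1, R2, R3, R4⟩ := ih vis stk hrect
        have hNew : ∀ q, New g r c v (i, j) (d :: t) vis q ↔ New g r c v (i, j) t vis q := by
          intro q
          unfold New
          constructor
          · rintro ⟨d0, hd0, rfl, hin, hv, hfalse⟩
            rcases List.mem_cons.mp hd0 with rfl | hd0t
            · exact absurd ⟨hin.1, hin.2.1, hin.2.2.1, hin.2.2.2, hv, hfalse⟩ hg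
            · exact ⟨d0, hd0t, rfl, hin, hv, hfalse⟩
          · rintro ⟨d0, hd0, rfl, hin, hv, hfalse⟩
            exact ⟨d0, by simp [hd0], rfl, hin, hv, hfalse⟩
        refine ⟨R1, R2, ?_, ?_⟩
        · intro q hq
          rw [R3 q hq, hNew q]
        · intro q
          rw [R4 q, hNew q]

theorem dfs_char (g : List (List Int)) (r c v : Int) (fuel : Nat) :
    ∀ (stack : List (Int × Int)) (vis : List (List Bool)),
    Rect vis r c →
    stack.length + countFalse vis ≤ fuel →
    (∀ p ∈ stack, vget vis p.1 p.2 = true ∧ inb r c p ∧ gv g p.1 p.2 = v) →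
    (∀ p, inb r c p → vget vis p.1 p.2 = true → gv g p.1 p.2 = v →
      p ∈ stack ∨ ∀ q, estep g r c p q → vget vis q.1 q.2 = true) →
    Rect (dfsLoop g r c v fuel stack vis) r c ∧
      (∀ p, inb r c p →
        (vget (dfsLoop g r c v fuel stack vis) p.1 p.2 = true ↔
          vget vis p.1 p.2 = true ∨ ∃ s ∈ stack, reach g r c s p)) := by
  induction fuel with
  | zero =>
      intro stack vis hrect hfuel hstack hproc
      cases stack with
      | nil =>
          refine ⟨hrect, ?_⟩
          intro p _
          simp [dfsLoop]
      | cons p rest => simp at hfuel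
  | succ f ihf =>
      intro stack vis hrect hfuel hstack hproc
      cases stack with
      | nil =>
          refine ⟨hrect, ?_⟩
          intro p _
          simp [dfsLoop]
      | cons p0 rest =>
          obtain ⟨i, j⟩ := p0
          obtain ⟨hmark_p, hinb_p, hval_p⟩ := hstack (i, j) (List.mem_cons_self)
          -- one unfolding of the while loop, with the step function in β/ζ-normal form
          show Rect (dfsLoop g r c v f
              (dijs.foldl (fun st d =>
                if 0 ≤ i + d.1 ∧ i + d.1 < r ∧ 0 ≤ j + d.2 ∧ j + d.2 < c ∧
                    gv g (i + d.1) (j + d.2) = v ∧ vget st.1 (i + d.1) (j + d.2) = false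
                then (vset st.1 (i + d.1) (j + d.2), (i + d.1, j + d.2) :: st.2) else st)
                (vis, rest)).2
              (dijs.foldl (fun st d =>
                if 0 ≤ i + d.1 ∧ i + d.1 < r ∧ 0 ≤ j + d.2 ∧ j + d.2 < c ∧
                    gv g (i + d.1) (j + d.2) = v ∧ vget st.1 (i + d.1) (j + d.2) = false
                then (vset st.1 (i + d.1) (j + d.2), (i + d.1, j + d.2) :: st.2) else st)
                (vis, rest)).1) r c ∧
            (∀ p, inb r c p →
              (vget (dfsLoop g r c v f
                (dijs.foldl (fun st d =>
                  if 0 ≤ i + d.1 ∧ i + d.1 < r ∧ 0 ≤ j + d.2 ∧ j + d.2 < c ∧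
                      gv g (i + d.1) (j + d.2) = v ∧ vget st.1 (i + d.1) (j + d.2) = false
                  then (vset st.1 (i + d.1) (j + d.2), (i + d.1, j + d.2) :: st.2) else st)
                  (vis, rest)).2
                (dijs.foldl (fun st d =>
                  if 0 ≤ i + d.1 ∧ i + d.1 < r ∧ 0 ≤ j + d.2 ∧ j + d.2 < c ∧
                      gv g (i + d.1) (j + d.2) = v ∧ vget st.1 (i + d.1) (j + d.2) = false
                  then (vset st.1 (i + d.1) (j + d.2), (i + d.1, j + d.2) :: st.2) else st)
                  (vis, rest)).1) p.1 p.2 = true ↔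
                vget vis p.1 p.2 = true ∨ ∃ s ∈ (i, j) :: rest, reach g r c s p))
          obtain ⟨I1, I2, I3, I4⟩ := dfs_inner g r c v i j dijs vis rest hrect
          set ST := dijs.foldl (fun st d =>
              if 0 ≤ i + d.1 ∧ i + d.1 < r ∧ 0 ≤ j + d.2 ∧ j + d.2 < c ∧
                  gv g (i + d.1) (j + d.2) = v ∧ vget st.1 (i + d.1) (j + d.2) = false
              then (vset st.1 (i + d.1) (j + d.2), (i + d.1, j + d.2) :: st.2) else st)
              (vis, rest) with hST
          -- New cells take one estep from (i, j)
          have hNew_estep : ∀ q, New g r c v (i, j) dijs vis q → estep g r c (i, j) q := by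
            rintro q ⟨d, hd, rfl, hin, hv, _⟩
            exact (estep_iff_dijs v (i, j) _ hval_p).mpr ⟨hin, ⟨d, hd, rfl⟩, hv⟩
          -- after expansion every estep-successor of (i, j) is marked
          have hsucc : ∀ q, estep g r c (i, j) q → vget ST.1 q.1 q.2 = true := by
            intro q hq
            obtain ⟨hin, ⟨d, hd, rfl⟩, hv⟩ := (estep_iff_dijs v (i, j) q hval_p).mp hq
            rw [I3 _ hin]
            by_cases hm : vget vis ((i, j).1 + d.1, (i, j).2 + d.2).1
                ((i, j).1 + d.1, (i, j).2 + d.2).2 = true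
            · exact Or.inl hm
            · exact Or.inr ⟨d, hd, rfl, hin, hv, by simpa using hm⟩
          -- loop invariants for the recursive call
          have hstack' : ∀ q ∈ ST.2, vget ST.1 q.1 q.2 = true ∧ inb r c q ∧ gv g q.1 q.2 = v := by
            intro q hqm
            rcases (I4 q).mp hqm with hqr | hqn
            · obtain ⟨hm, hin, hv⟩ := hstack q (List.mem_cons_of_mem _ hqr)
              exact ⟨(I3 q hin).mpr (Or.inl hm), hin, hv⟩
            · obtain ⟨d, hd, hqe, hin, hv, hf⟩ := hqn
              exact ⟨(I3 q hin).mpr (Or.inr ⟨d, hd, hqe, hin, hv, hf⟩), hin, hv⟩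
          have hproc' : ∀ p, inb r c p → vget ST.1 p.1 p.2 = true → gv g p.1 p.2 = v →
              p ∈ ST.2 ∨ ∀ q, estep g r c p q → vget ST.1 q.1 q.2 = true := by
            intro p hin hm hv
            rcases (I3 p hin).mp hm with hmv | hnew
            · rcases hproc p hin hmv hv with hmem | hcl
              · rcases List.mem_cons.mp hmem with rfl | hmem2
                · exact Or.inr hsucc
                · exact Or.inl ((I4 p).mpr (Or.inl hmem2))
              · refine Or.inr fun q hq => (I3 q hq.1).mpr (Or.inl (hcl q hq))
            · exact Or.inl ((I4 p).mpr (Or.inr hnew))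
          have hfuel' : ST.2.length + countFalse ST.1 ≤ f := by
            rw [I2]
            simp only [List.length_cons] at hfuel
            omega
          obtain ⟨hrectO, hcharO⟩ := ihf ST.2 ST.1 I1 hfuel' hstack' hproc'
          refine ⟨hrectO, ?_⟩
          intro q hq
          rw [hcharO q hq]
          have habsorb : ∀ x q', reach g r c x q' → vget ST.1 x.1 x.2 = true → inb r c x →
              gv g x.1 x.2 = v →
              (vget ST.1 q'.1 q'.2 = true ∨ ∃ s ∈ ST.2, reach g r c s q') := by
            intro x q' hreach
            induction hreach using Relation.ReflTransGen.head_induction_on with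
            | refl => intro hm _ _; exact Or.inl hm
            | @head a b hstep hrest ih =>
                intro hma hina hva
                rcases hproc' a hina hma hva with hin2 | hcl
                · exact Or.inr ⟨a, hin2, Relation.ReflTransGen.head hstep hrest⟩
                · exact ih (hcl _ hstep) hstep.1 (hstep.2.2.trans hva)
          constructor
          · rintro (hm | ⟨s, hs, hr⟩)
            · rcases (I3 q hq).mp hm with hmv | hnew
              · exact Or.inl hmv
              · exact Or.inr ⟨(i, j), List.mem_cons_self,
                  Relation.ReflTransGen.single (hNew_estep q hnew)⟩
            · rcases (I4 s).mp hs with hsr | hsn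
              · exact Or.inr ⟨s, List.mem_cons_of_mem _ hsr, hr⟩
              · exact Or.inr ⟨(i, j), List.mem_cons_self,
                  Relation.ReflTransGen.head (hNew_estep s hsn) hr⟩
          · rintro (hm | ⟨s, hs, hr⟩)
            · exact Or.inl ((I3 q hq).mpr (Or.inl hm))
            · rcases List.mem_cons.mp hs with rfl | hsr
              · exact habsorb (i, j) q hr ((I3 (i, j) hinb_p).mpr (Or.inl hmark_p)) hinb_p hval_p
              · exact Or.inr ⟨s, (I4 s).mpr (Or.inl hsr), hr⟩

theorem sweep_foldl_nodup (g : List (List Int)) (r c : Int) (l : List Int)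
    (M0 : PySem.Set (Int × Int)) (h : M0.Nodup) :
    (l.foldl (fun M _ => sweepStep g r c M) M0).Nodup := by
  induction l generalizing M0 with
  | nil => exact h
  | cons x t ih => exact ih _ (PySem.Set.nodup_union _ _ h)

theorem sweep_foldl_inb (g : List (List Int)) (r c : Int) (l : List Int)
    (M0 : PySem.Set (Int × Int)) (h : ∀ q ∈ M0, inb r c q) :
    ∀ q ∈ l.foldl (fun M _ => sweepStep g r c M) M0, inb r c q := by
  induction l generalizing M0 with
  | nil => exact h
  | cons x t ih =>
      refine ih _ ?_
      intro q hq
      rcases (sweepStep_mem g r c M0 q).mp hq with hq | ⟨p, _, he⟩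
      · exact h q hq
      · exact he.1

theorem full_iff {r c : Int} (M : List (Int × Int)) (hnd : M.Nodup)
    (hin : ∀ q ∈ M, inb r c q) :
    M.length = r.toNat * c.toNat ↔ ∀ q, inb r c q → q ∈ M := by
  constructor
  · exact fun hlen q hq => mem_of_full M hnd hin hlen hq
  · intro hcov
    classical
    refine le_antisymm (length_le_cells M hnd hin) ?_
    have hsub : ((Finset.range r.toNat ×ˢ Finset.range c.toNat).image
        (fun ab => ((ab.1 : Int), (ab.2 : Int)))) ⊆ M.toFinset := by
      intro q hq
      rw [Finset.mem_image] at hq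
      obtain ⟨⟨a, b⟩, hab, rfl⟩ := hq
      rw [Finset.mem_product] at hab
      rw [List.mem_toFinset]
      refine hcov _ ⟨?_, ?_, ?_, ?_⟩ <;> simp at hab ⊢ <;> omega
    have hcard := Finset.card_le_card hsub
    have himg : ((Finset.range r.toNat ×ˢ Finset.range c.toNat).image
        (fun ab => ((ab.1 : Int), (ab.2 : Int)))).card = r.toNat * c.toNat := by
      rw [Finset.card_image_of_injective]
      · simp
      · intro a b hab
        simp only [Prod.ext_iff] at hab ⊢
        omega
    rw [himg, List.toFinset_card_of_nodup hnd] at hcard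
    exact hcard

-- the marked matrix after A's two DFS passes holds exactly the two components
theorem visA_char (g : List (List Int)) (r c v1 v2 : Int) (s1 s2 : Int × Int)
    (h1 : inb r c s1) (h2 : inb r c s2)
    (hv1 : v1 = gv g s1.1 s1.2) (hv2 : v2 = gv g s2.1 s2.2) (hvne : v1 ≠ v2) :
    let vis0 : List (List Bool) := List.replicate r.toNat (List.replicate c.toNat false)
    let vis1 := dfsLoop g r c v1 (r.toNat * c.toNat + 1) [s1] (vset vis0 s1.1 s1.2)
    let vis2 := dfsLoop g r c v2 (r.toNat * c.toNat + 1) [s2] (vset vis1 s2.1 s2.2)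
    Rect vis2 r c ∧ ∀ q, inb r c q →
      (vget vis2 q.1 q.2 = true ↔ reach g r c s1 q ∨ reach g r c s2 q) := by
  intro vis0 vis1 vis2
  have hrect0 : Rect vis0 r c := rect_vis0 r c
  have hrect0' : Rect (vset vis0 s1.1 s1.2) r c := rect_vset hrect0 (by simpa using h1)
  have hget0' : ∀ q, inb r c q →
      (vget (vset vis0 s1.1 s1.2) q.1 q.2 = true ↔ q = s1) := by
    intro q hq
    rw [vget_vset hrect0 (by simpa using h1) q.1 q.2 (by simpa using hq)]
    constructor
    · intro h
      split at h
      · obtain ⟨e1, e2⟩ := ‹_ ∧ _›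
        exact Prod.ext e1 e2
      · rw [vget_vis0] at h
        exact absurd h (by simp)
    · rintro rfl
      simp
  have hdfs1 := dfs_char g r c v1 (r.toNat * c.toNat + 1) [s1] (vset vis0 s1.1 s1.2)
    hrect0'
    (by
      have := countFalse_le hrect0'
      simp only [List.length_cons, List.length_nil]
      omega)
    (by
      intro p hp
      rcases List.mem_cons.mp hp with rfl | hn
      · exact ⟨(hget0' p (by simpa using h1)).mpr rfl, h1, hv1.symm⟩
      · exact absurd hn List.not_mem_nil)
    (by
      intro p hin hm _
      left
      rw [hget0' p hin] at hm
      simp [hm])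
  obtain ⟨hrect1, hchar1⟩ := hdfs1
  have hchar1' : ∀ q, inb r c q → (vget vis1 q.1 q.2 = true ↔ reach g r c s1 q) := by
    intro q hq
    rw [show vis1 = dfsLoop g r c v1 (r.toNat * c.toNat + 1) [s1] (vset vis0 s1.1 s1.2) from rfl,
      hchar1 q hq, hget0' q hq]
    constructor
    · rintro (rfl | ⟨s, hs, hr⟩)
      · exact Relation.ReflTransGen.refl
      · rcases List.mem_cons.mp hs with rfl | hn
        · exact hr
        · exact absurd hn List.not_mem_nil
    · intro h
      exact Or.inr ⟨s1, List.mem_cons_self, h⟩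
  have hrect1' : Rect (vset vis1 s2.1 s2.2) r c := rect_vset hrect1 (by simpa using h2)
  have hget1' : ∀ q, inb r c q →
      (vget (vset vis1 s2.1 s2.2) q.1 q.2 = true ↔ q = s2 ∨ reach g r c s1 q) := by
    intro q hq
    rw [vget_vset hrect1 (by simpa using h2) q.1 q.2 (by simpa using hq)]
    constructor
    · intro h
      split at h
      · obtain ⟨e1, e2⟩ := ‹_ ∧ _›
        exact Or.inl (Prod.ext e1 e2)
      · exact Or.inr ((hchar1' q hq).mp h)
    · rintro (rfl | hr)
      · simp
      · split
        · rfl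
        · exact (hchar1' q hq).mpr hr
  have hdfs2 := dfs_char g r c v2 (r.toNat * c.toNat + 1) [s2] (vset vis1 s2.1 s2.2)
    hrect1'
    (by
      have := countFalse_le hrect1'
      simp only [List.length_cons, List.length_nil]
      omega)
    (by
      intro p hp
      rcases List.mem_cons.mp hp with rfl | hn
      · exact ⟨(hget1' p (by simpa using h2)).mpr (Or.inl rfl), h2, hv2.symm⟩
      · exact absurd hn List.not_mem_nil)
    (by
      intro p hin hm hv
      rw [hget1' p hin] at hm
      rcases hm with rfl | hr
      · exact Or.inl List.mem_cons_self
      · exact absurd (hv1.trans ((reach_val hr).symm.trans hv)) hvne)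
  obtain ⟨hrect2, hchar2⟩ := hdfs2
  refine ⟨hrect2, ?_⟩
  intro q hq
  rw [show vis2 = dfsLoop g r c v2 (r.toNat * c.toNat + 1) [s2] (vset vis1 s2.1 s2.2) from rfl,
    hchar2 q hq, hget1' q hq]
  constructor
  · rintro ((rfl | hr) | ⟨s, hs, hr⟩)
    · exact Or.inr Relation.ReflTransGen.refl
    · exact Or.inl hr
    · rcases List.mem_cons.mp hs with rfl | hn
      · exact Or.inr hr
      · exact absurd hn List.not_mem_nil
  · rintro (hr | hr)
    · exact Or.inl (Or.inr hr)
    · exact Or.inr ⟨s2, List.mem_cons_self, hr⟩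

-- ===== VERDICT (by name: the statement is the Claim_ definition above) =====
theorem solve_spec : Claim_equal_solve := by
  intro grid _ hpre
  unfold Spec_solve solve solve_alt
  have hrl := rowLens_of_pre hpre
  obtain ⟨hne, hcpos, hall⟩ := hpre
  set r : Int := (grid.length : Int) with hr
  set c : Int := ((grid.headD []).length : Int) with hc
  rw [hrl]
  simp only []
  set poss := borderPoss grid r c with hposs
  by_cases hsize : poss.size ≠ 2
  · rw [if_pos hsize, if_pos hsize]
  · rw [if_neg hsize, if_neg hsize]
    have hr1 : 1 ≤ r := by
      rw [hr]
      cases grid with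
      | nil => exact absurd rfl hne
      | cons a t => simp
    have hc1 : 1 ≤ c := by rw [hc]; omega
    -- the two dictionary entries
    have hlen2 : poss.items.length = 2 := by
      have : poss.size = 2 := by omega
      exact this
    obtain ⟨kv1, kv2, hitems⟩ : ∃ a b, poss.items = [a, b] := by
      match hh : poss.items with
      | [a, b] => exact ⟨a, b, rfl⟩
      | [] => rw [hh] at hlen2; simp at hlen2
      | [a] => rw [hh] at hlen2; simp at hlen2
      | a :: b :: c :: t => rw [hh] at hlen2; simp at hlen2
    obtain ⟨v1, s1⟩ := kv1
    obtain ⟨v2, s2⟩ := kv2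
    have hm1 := borderPoss_items_mem (kv := (v1, s1)) (by rw [← hposs, hitems]; simp)
    have hm2 := borderPoss_items_mem (kv := (v2, s2)) (by rw [← hposs, hitems]; simp)
    have hk1 : v1 = gv grid s1.1 s1.2 := hm1.2
    have hk2 : v2 = gv grid s2.1 s2.2 := hm2.2
    have hb1 : s1 ∈ borderCoords r c := hm1.1
    have hb2 : s2 ∈ borderCoords r c := hm2.1
    have hin1 : inb r c s1 := borderCoords_inb hr1 hc1 hb1
    have hin2 : inb r c s2 := borderCoords_inb hr1 hc1 hb2
    have hvne : v1 ≠ v2 := by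
      have hnd := borderPoss_keys_nodup grid r c
      rw [← hposs] at hnd
      rw [show poss.keys = poss.items.map (·.1) from rfl, hitems] at hnd
      simp at hnd
      exact hnd
    have hsne : s1 ≠ s2 := by
      intro hcon
      apply hvne
      rw [hk1, hk2, hcon]
    -- A's visited matrix
    rw [hitems]
    simp only [List.foldl_cons, List.foldl_nil]
    obtain ⟨hrect2, hchar2⟩ := visA_char grid r c v1 v2 s1 s2 hin1 hin2 hk1 hk2 hvne
    -- B's marked set
    have hvals : poss.values = [s1, s2] := by
      rw [show poss.values = poss.items.map (·.2) from rfl, hitems]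
      rfl
    rw [hvals]
    have hM := sweep_final_char grid r c s1 s2 hin1 hin2 hsne
    set M := (PySem.List.pyRange 0 (r * c) 1).foldl
      (fun M _ => sweepStep grid r c M) (PySem.Set.ofList [s1, s2]) with hMdef
    have hMnodup : M.Nodup := sweep_foldl_nodup grid r c _ _ (PySem.Set.nodup_ofList _)
    have hMinb : ∀ q ∈ M, inb r c q := by
      refine sweep_foldl_inb grid r c _ _ ?_
      intro q hq
      rw [PySem.Set.mem_ofList] at hq
      rcases List.mem_cons.mp hq with rfl | hq2
      · exact hin1
      · rcases List.mem_cons.mp hq2 with rfl | hq3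
        · exact hin2
        · exact absurd hq3 List.not_mem_nil
    -- the two success conditions are equivalent
    have hA : ∀ vis2 : List (List Bool), Rect vis2 r c →
        (∀ q, inb r c q → (vget vis2 q.1 q.2 = true ↔ reach grid r c s1 q ∨ reach grid r c s2 q)) →
        ((vis2.all fun row => row.all id) = true ↔
          ∀ q, inb r c q → reach grid r c s1 q ∨ reach grid r c s2 q) := by
      intro vis2 hrect hch
      rw [all_iff_vget hrect]
      constructor
      · intro h q hq
        exact (hch q hq).mp (h q hq)
      · intro h q hq
        exact (hch q hq).mpr (h q hq)
    have hB : ((M.length : Int) = r * c) ↔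
        ∀ q, inb r c q → reach grid r c s1 q ∨ reach grid r c s2 q := by
      have hcast : ((M.length : Int) = r * c) ↔ M.length = r.toNat * c.toNat := by
        rw [hr, hc, Int.toNat_natCast, Int.toNat_natCast, ← Nat.cast_mul, Nat.cast_inj]
      rw [hcast, full_iff M hMnodup hMinb]
      constructor
      · intro h q hq
        exact (hM q).mp (h q hq)
      · intro h q hq
        exact (hM q).mpr (h q hq)
    by_cases hcov : ∀ q, inb r c q → reach grid r c s1 q ∨ reach grid r c s2 q
    · rw [if_neg (by
        rw [hA _ hrect2 hchar2]
        exact fun h => h hcov), if_neg (by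
        simp only [ne_eq, not_not]
        exact hB.mpr hcov)]
      -- the parity sums agree block by block
      congr 1
      congr 1
      apply congrArg List.sum
      apply List.map_congr_left
      intro i _
      apply congrArg List.sum
      apply List.map_congr_left
      intro j _
      simp only [List.map_cons, List.map_nil, List.sum_cons, List.sum_nil, add_zero]
      have e1 : decide (gv grid i j ≠ gv grid i (j + 1)) =
          decide (gv grid i (j + 1) ≠ gv grid i j) := by simp only [ne_comm]
      have e2 : decide (gv grid i j ≠ gv grid (i + 1) j) =
          decide (gv grid (i + 1) j ≠ gv grid i j) := by simp only [ne_comm]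
      have e3 : decide (gv grid i j ≠ gv grid (i + 1) (j + 1)) =
          decide (gv grid (i + 1) (j + 1) ≠ gv grid i j) := by simp only [ne_comm]
      rw [e1, e2, e3]
      by_cases h1 : gv grid i (j + 1) = gv grid i j <;>
        by_cases h2 : gv grid (i + 1) j = gv grid i j <;>
          by_cases h3 : gv grid (i + 1) (j + 1) = gv grid i j <;>
            simp [h1, h2, h3] <;> decide
    · rw [if_pos (by
        rw [hA _ hrect2 hchar2]
        exact hcov), if_pos (by
        simp only [ne_eq]
        exact fun he => hcov (hB.mp he))]
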